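-- pv_equiv track=rewrite | github.com/Sefaria/Sefaria-Data | sources/kehot_chp_chumash/handle_chp.py | partition_dict_by_first_word
-- ===== SOURCE A (Python) =====
-- def partition_dict_by_first_word(d):
--     partitioned_dicts = {}
--     for key, value in d.items():
--         first_word = key.split()[0]
--         if first_word not in partitioned_dicts:
--             partitioned_dicts[first_word] = {}
--         partitioned_dicts[first_word][key] = value
--     return partitioned_dicts
-- ===== SOURCE B (Python) =====
-- def partition_dict_by_first_word(d):
--     # One pass to tag each item with its first word, then a grouped
--     # comprehension per distinct first word (first-occurrence order).
--     items = [(key.split()[0], key, value) for key, value in d.items()]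
--     order = dict.fromkeys(fw for fw, _, _ in items)
--     return {fw: {k: v for f, k, v in items if f == fw} for fw in order}
-- ===== Notes on version B (the rewrite author's own statement) =====
-- stated objective: alternative
-- what changed: Replaces A's incremental bucket insertion into a dict-of-dicts by a tag-then-group pass: tag every item with its first word once, take the distinct first words in order with dict.fromkeys, and build each group by a filtering comprehension.
import Mathlib
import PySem

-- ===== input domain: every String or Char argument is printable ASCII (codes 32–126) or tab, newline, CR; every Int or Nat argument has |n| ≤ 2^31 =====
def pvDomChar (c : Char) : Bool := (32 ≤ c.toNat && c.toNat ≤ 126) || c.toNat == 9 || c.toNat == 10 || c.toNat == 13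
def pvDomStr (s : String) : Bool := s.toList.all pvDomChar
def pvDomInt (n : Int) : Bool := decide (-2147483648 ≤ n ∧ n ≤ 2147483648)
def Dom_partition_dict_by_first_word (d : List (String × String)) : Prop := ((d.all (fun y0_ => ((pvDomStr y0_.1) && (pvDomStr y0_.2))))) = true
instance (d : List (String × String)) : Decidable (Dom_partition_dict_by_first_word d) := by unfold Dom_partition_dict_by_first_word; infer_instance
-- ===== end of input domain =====

-- B replaces A's incremental bucket insertion into a dict-of-dicts by a tag-then-group
-- pass: distinct first words once (first-occurrence order), then one filter per group.

-- ===== PORT A =====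
-- key.split()[0]; total form with a dummy default, used only under Pre_ (split nonempty)
def pvFirstWord (k : String) : String := PySem.List.pyGetD (PySem.Str.split₀ k) 0 ""

-- loop body of A: ensure the bucket exists, then set pd[first_word][key] = value
def pvStepA (pd : PySem.Dict String (PySem.Dict String String)) (kv : String × String) :
    PySem.Dict String (PySem.Dict String String) :=
  let fw := pvFirstWord kv.1
  let pd := if pd.contains fw then pd else pd.insert fw PySem.Dict.empty
  pd.insert fw ((pd.getD fw PySem.Dict.empty).insert kv.1 kv.2)

def partition_dict_by_first_word (d : List (String × String)) : List (String × List (String × String)) :=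
  ((d.foldl pvStepA PySem.Dict.empty).items).map (fun p => (p.1, p.2.items))

-- ===== PORT B =====
def partition_dict_by_first_word_alt (d : List (String × String)) : List (String × List (String × String)) :=
  let items := d.map (fun kv => (pvFirstWord kv.1, kv.1, kv.2))
  let order := PySem.List.dedup (items.map (fun t => t.1))
  order.map (fun fw => (fw, (items.filter (fun t => t.1 == fw)).map (fun t => t.2)))

-- ===== PRECONDITION & SPEC =====
-- Pre_ excludes (i) keys that are empty or whitespace-only, on which A raises IndexError
-- at key.split()[0], and (ii) duplicate-key lists, which represent no Python dict input
-- (the parameter d is a dict, whose keys are unique).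
def Pre_partition_dict_by_first_word (d : List (String × String)) : Prop :=
  (∀ kv ∈ d, PySem.Str.split₀ kv.1 ≠ []) ∧ (d.map Prod.fst).Nodup
instance (d : List (String × String)) : Decidable (Pre_partition_dict_by_first_word d) := by
  unfold Pre_partition_dict_by_first_word; infer_instance

def pvWitness_partition_dict_by_first_word : (List (String × String)) :=
  [("a b", "1"), ("a c", "2"), ("b x", "3")]

def Spec_partition_dict_by_first_word (d : List (String × String)) (out : List (String × List (String × String))) : Prop := out = partition_dict_by_first_word_alt d
instance (d : List (String × String)) (out : List (String × List (String × String))) : Decidable (Spec_partition_dict_by_first_word d out) := by unfold Spec_partition_dict_by_first_word; infer_instance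

-- ===== CLAIM (what is proved, stated in full; the proofs are below) =====
def Claim_equal_partition_dict_by_first_word : Prop := ∀ (d : List (String × String)), Dom_partition_dict_by_first_word d → Pre_partition_dict_by_first_word d → Spec_partition_dict_by_first_word d (partition_dict_by_first_word d)

-- ===== LEMMAS AND PROOFS =====

-- the group of w: the pairs of l whose key has first word w, in order
def pvGroup (l : List (String × String)) (w : String) : List (String × String) :=
  l.filter (fun q => pvFirstWord q.1 == w)

lemma pv_filter_not_contains_insert (pd : PySem.Dict String (PySem.Dict String String))
    (w : String) (v : PySem.Dict String String) (s : List String) :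
    s.filter (fun a => !(pd.insert w v).contains a) =
      (s.filter (fun y => !(y == w))).filter (fun a => !pd.contains a) := by
  rw [List.filter_filter]
  apply List.filter_congr
  intro a _
  simp [PySem.Dict.contains_insert, Bool.and_comm]

lemma pv_step_contains (pd : PySem.Dict String (PySem.Dict String String)) (kv : String × String)
    (hc : pd.contains (pvFirstWord kv.1) = true) :
    pvStepA pd kv = pd.insert (pvFirstWord kv.1)
      ((pd.getD (pvFirstWord kv.1) PySem.Dict.empty).insert kv.1 kv.2) := by
  simp [pvStepA, hc]

lemma pv_step_not_contains (pd : PySem.Dict String (PySem.Dict String String)) (kv : String × String)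
    (hc : pd.contains (pvFirstWord kv.1) = false) :
    pvStepA pd kv = pd.insert (pvFirstWord kv.1) (PySem.Dict.empty.insert kv.1 kv.2) := by
  simp [pvStepA, hc, PySem.Dict.getD_insert_self, PySem.Dict.insert_insert_self]

-- A's loop invariant: folding the remaining list l into an accumulator pd (whose inner
-- keys are all fresh w.r.t. l) extends every existing bucket by its group of l and
-- appends a bucket per new first word, in first-occurrence order.
lemma pv_foldA_items (l : List (String × String)) (pd : PySem.Dict String (PySem.Dict String String))
    (hnd : pd.keys.Nodup)
    (hfresh : ∀ p ∈ pd.items, ∀ q ∈ p.2.items, q.1 ∉ l.map Prod.fst)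
    (hl : (l.map Prod.fst).Nodup) :
    ((l.foldl pvStepA pd).items).map (fun p => (p.1, p.2.items)) =
      pd.items.map (fun p => (p.1, p.2.items ++ pvGroup l p.1)) ++
      ((PySem.List.dedup (l.map (fun q => pvFirstWord q.1))).filter
          (fun w => !pd.contains w)).map (fun w => (w, pvGroup l w)) := by
  induction l generalizing pd with
  | nil => simp [pvGroup]
  | cons kv l ih =>
    rw [List.foldl_cons]
    set w := pvFirstWord kv.1 with hw
    -- first-occurrence order of the distinct first words
    have hded : PySem.List.dedup ((kv :: l).map (fun q => pvFirstWord q.1)) =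
        w :: (PySem.List.dedup (l.map (fun q => pvFirstWord q.1))).filter (fun y => !(y == w)) := by
      simp [PySem.List.dedup_eq_ofList, PySem.Set.ofList_cons, PySem.Set.discard, ← hw]
    have hgcons_self : pvGroup (kv :: l) w = kv :: pvGroup l w := by
      simp [pvGroup, hw]
    have hgcons_ne : ∀ a, a ≠ w → pvGroup (kv :: l) a = pvGroup l a := by
      intro a ha
      simp [pvGroup,
        show (pvFirstWord kv.1 == a) = false by simpa [← hw] using (bne_iff_ne.mpr (Ne.symm ha))]
    by_cases hc : pd.contains w = true
    · -- bucket exists: in-place update of the inner dict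
      obtain ⟨inner, hinner⟩ : ∃ v, (w, v) ∈ pd.items := by
        have := (PySem.Dict.contains_iff_mem_keys pd w).mp hc
        simp only [PySem.Dict.keys, List.mem_map] at this
        obtain ⟨p, hp, hpw⟩ := this
        exact ⟨p.2, by simpa [← hpw] using hp⟩
      have hgetD : pd.getD w PySem.Dict.empty = inner :=
        PySem.Dict.getD_of_mem_items pd hinner hnd _
      have hkfresh : inner.contains kv.1 = false := by
        by_contra h
        have h' : kv.1 ∈ inner.keys := (PySem.Dict.contains_iff_mem_keys inner kv.1).mp
          (by revert h; cases inner.contains kv.1 <;> simp)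
        simp only [PySem.Dict.keys, List.mem_map] at h'
        obtain ⟨q, hq, hq1⟩ := h'
        exact hfresh _ hinner q hq (by simp [hq1])
      have hitems' : (pvStepA pd kv).items =
          pd.items.map (fun p => if p.1 == w then (w, inner.insert kv.1 kv.2) else p) := by
        rw [pv_step_contains pd kv hc, hgetD, PySem.Dict.items_insert_of_contains _ _ hc]
      have hinneritems : (inner.insert kv.1 kv.2).items = inner.items ++ [kv] := by
        rw [PySem.Dict.items_insert_of_not_contains _ _ hkfresh]
      have hkeys' : (pvStepA pd kv).keys = pd.keys := by
        rw [pv_step_contains pd kv hc, hgetD, PySem.Dict.keys_insert_of_contains _ _ hc]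
      rw [ih (pvStepA pd kv) (by rw [hkeys']; exact hnd)
        (by
          intro p hp q hq
          rw [hitems'] at hp
          simp only [List.mem_map] at hp
          obtain ⟨p0, hp0, hp0e⟩ := hp
          by_cases hpw : (p0.1 == w) = true
          · subst hp0e
            simp only [hpw, if_pos] at hq ⊢
            rw [hinneritems] at hq
            rcases List.mem_append.mp hq with h | h
            · exact fun hm => hfresh _ hinner q h (by simp [hm])
            · simp only [List.mem_singleton] at h
              subst h
              exact (List.nodup_cons.mp hl).1
          · subst hp0e
            simp only [hpw, if_neg, Bool.false_eq_true, not_false_iff] at hq ⊢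
            exact fun hm => hfresh _ hp0 q hq (by simp [hm]))
        (List.nodup_cons.mp hl).2]
      rw [hitems']
      rw [List.map_map, hded]
      rw [List.filter_cons_of_neg (by simp [hc])]
      rw [pv_step_contains pd kv hc, hgetD, pv_filter_not_contains_insert]
      congr 1
      · apply List.map_congr_left
        intro p hp
        by_cases hpw : (p.1 == w) = true
        · have hp1 : p.1 = w := by simpa using hpw
          have hp2 : p.2 = inner := by
            have h1 : pd.getD p.1 PySem.Dict.empty = p.2 :=
              PySem.Dict.getD_of_mem_items pd (by exact (by simpa using hp : (p.1, p.2) ∈ pd.items)) hnd _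
            rw [hp1, hgetD] at h1; exact h1.symm
          simp only [Function.comp_apply, hp1, hp2, hgcons_self]
          simp [hinneritems]
        · have hp1 : p.1 ≠ w := by simpa using hpw
          simp only [Function.comp_apply, hpw, if_neg, Bool.false_eq_true, not_false_iff]
          rw [hgcons_ne p.1 hp1]
      · apply List.map_congr_left
        intro a ha
        have haw : a ≠ w := by
          have h1 := List.of_mem_filter (List.mem_of_mem_filter ha)
          simpa using h1
        rw [hgcons_ne a haw]
    · -- new first word: a fresh bucket is appended
      have hc' : pd.contains w = false := by revert hc; cases pd.contains w <;> simp
      have hitems' : (pvStepA pd kv).items = pd.items ++ [(w, PySem.Dict.empty.insert kv.1 kv.2)] := by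
        rw [pv_step_not_contains pd kv hc', PySem.Dict.items_insert_of_not_contains _ _ hc']
      have hsingle : (PySem.Dict.empty.insert kv.1 kv.2).items = [kv] := by
        rw [PySem.Dict.items_insert_of_not_contains _ _ (PySem.Dict.contains_empty kv.1)]
        rfl
      have hmemc : ∀ p ∈ pd.items, pd.contains p.1 = true := by
        intro p hp
        exact (PySem.Dict.contains_iff_mem_keys pd p.1).mpr
          (by simp only [PySem.Dict.keys, List.mem_map]; exact ⟨p, hp, rfl⟩)
      rw [ih (pvStepA pd kv)
        (by rw [pv_step_not_contains pd kv hc']; exact PySem.Dict.nodup_keys_insert _ _ _ hnd)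
        (by
          intro p hp q hq
          rw [hitems'] at hp
          rcases List.mem_append.mp hp with h | h
          · exact fun hm => hfresh _ h q hq (by simp [hm])
          · simp only [List.mem_singleton] at h
            subst h
            rw [hsingle] at hq
            simp only [List.mem_singleton] at hq
            subst hq
            exact (List.nodup_cons.mp hl).1)
        (List.nodup_cons.mp hl).2]
      rw [hitems', List.map_append, hded]
      rw [List.filter_cons_of_pos (by simp [hc'])]
      rw [pv_step_not_contains pd kv hc', pv_filter_not_contains_insert]
      simp only [List.map_cons, hsingle, hgcons_self, List.singleton_append]
      simp only [List.map_nil, ← hw]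
      have hA : List.map (fun p => (p.1, p.2.items ++ pvGroup (kv :: l) p.1)) pd.items
          = List.map (fun p => (p.1, p.2.items ++ pvGroup l p.1)) pd.items := by
        apply List.map_congr_left
        intro p hp
        rw [hgcons_ne p.1 (by
          intro h
          have := hmemc p hp
          rw [h] at this
          exact absurd this (by simp [hc']))]
      have hT : List.map (fun a => (a, pvGroup (kv :: l) a))
            (List.filter (fun a => !pd.contains a)
              (List.filter (fun y => !y == w) (PySem.List.dedup (List.map (fun q => pvFirstWord q.1) l))))
          = List.map (fun a => (a, pvGroup l a))
            (List.filter (fun a => !pd.contains a)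
              (List.filter (fun y => !y == w) (PySem.List.dedup (List.map (fun q => pvFirstWord q.1) l)))) := by
        apply List.map_congr_left
        intro a ha
        have haw : a ≠ w := by
          have h1 := List.of_mem_filter (List.mem_of_mem_filter ha)
          simpa using h1
        rw [hgcons_ne a haw]
      rw [hA, hT]
      simp

-- ===== VERDICT (by name: the statement is the Claim_ definition above) =====
theorem partition_dict_by_first_word_spec : Claim_equal_partition_dict_by_first_word := by
  intro d _ hpre
  unfold Spec_partition_dict_by_first_word partition_dict_by_first_word
  rw [pv_foldA_items d PySem.Dict.empty PySem.Dict.nodup_keys_empty (by intro p hp; cases hp) hpre.2]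
  simp [partition_dict_by_first_word_alt, pvGroup, List.map_map, List.filter_map,
    Function.comp_def, PySem.Dict.empty]
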